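-- pv_equiv track=rewrite | github.com/4teamwork/ftw.solr | ftw/solr/query.py | split_simple_search
-- ===== SOURCE A (Python) =====
-- def split_simple_search(phrase):
--     parts = phrase.split('"')
--     terms = []
--     for i in range(0, len(parts)):
--         if i % 2 == 0:
--             # Unquoted text
--             terms.extend([term for term in parts[i].split() if term])
--         else:
--             # The uneven parts are those inside quotes
--             if parts[i]:
--                 terms.append('"%s"' % parts[i])
--     return terms
-- ===== SOURCE B (Python) =====
-- def split_simple_search(phrase):
--     terms = []
--     buf = ''
--     in_quote = False
--     for c in phrase:
--         if c == '"':
--             if buf: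
--                 terms.append('"' + buf + '"' if in_quote else buf)
--             buf = ''
--             in_quote = not in_quote
--         elif not in_quote and c.isspace():
--             if buf:
--                 terms.append(buf)
--             buf = ''
--         else:
--             buf += c
--     if buf:
--         terms.append('"' + buf + '"' if in_quote else buf)
--     return terms
-- ===== Notes on version B (the rewrite author's own statement) =====
-- stated objective: alternative
-- what changed: Replaced A's split-on-double-quote followed by a parity-indexed loop (whitespace-splitting even parts, wrapping odd parts) with a single left-to-right character scanner maintaining an in_quote flag and a pending buffer.
import Mathlib
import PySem

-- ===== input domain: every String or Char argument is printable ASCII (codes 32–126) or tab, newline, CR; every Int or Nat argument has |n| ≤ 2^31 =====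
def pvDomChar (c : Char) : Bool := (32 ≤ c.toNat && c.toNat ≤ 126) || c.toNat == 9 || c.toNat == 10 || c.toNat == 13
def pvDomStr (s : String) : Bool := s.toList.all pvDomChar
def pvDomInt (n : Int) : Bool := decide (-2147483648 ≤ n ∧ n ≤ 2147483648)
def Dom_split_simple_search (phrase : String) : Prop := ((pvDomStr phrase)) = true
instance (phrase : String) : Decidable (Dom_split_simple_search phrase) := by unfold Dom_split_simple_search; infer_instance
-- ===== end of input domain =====

-- B replaces A's split-on-double-quote / parity-indexed loop by a single-pass character scanner
-- with an in_quote flag and a pending buffer (objective: alternative decomposition).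

-- ===== PORT A =====
-- loop body of A's `for i in range(0, len(parts))`
def pvAStep (parts : List (List Char)) (terms : List (List Char)) (i : Int) : List (List Char) :=
  if PySem.Int.mod i 2 == 0 then
    -- terms.extend([term for term in parts[i].split() if term])
    terms ++ (PySem.Chars.split₀ (PySem.List.pyGetD parts i [])).filter (fun t => !t.isEmpty)
  else
    -- if parts[i]: terms.append('"%s"' % parts[i])
    if !(PySem.List.pyGetD parts i []).isEmpty then
      terms ++ ['"' :: (PySem.List.pyGetD parts i [] ++ ['"'])]
    else terms

def split_simple_search (phrase : String) : List String :=
  let parts := PySem.Chars.splitOn phrase.toList ['"']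
  let terms := (PySem.List.pyRange 0 (parts.length : Int) 1).foldl (pvAStep parts) []
  terms.map String.ofList

-- ===== PORT B =====
-- loop body of B's `for c in phrase`, state = (in_quote, buf, terms)
def pvScanStep (st : Bool × List Char × List (List Char)) (c : Char) :
    Bool × List Char × List (List Char) :=
  let inq := st.1
  let buf := st.2.1
  let acc := st.2.2
  if c == '"' then
    (!inq, [], if buf.isEmpty then acc else acc ++ [if inq then '"' :: (buf ++ ['"']) else buf])
  else if !inq && PySem.Chars.isspace c then
    (inq, [], if buf.isEmpty then acc else acc ++ [buf])
  else (inq, buf ++ [c], acc)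

def split_simple_search_alt (phrase : String) : List String :=
  let st := phrase.toList.foldl pvScanStep (false, [], [])
  let terms := if st.2.1.isEmpty then st.2.2
               else st.2.2 ++ [if st.1 then '"' :: (st.2.1 ++ ['"']) else st.2.1]
  terms.map String.ofList

-- ===== PRECONDITION & SPEC =====
def Spec_split_simple_search (phrase : String) (out : List String) : Prop := out = split_simple_search_alt phrase
instance (phrase : String) (out : List String) : Decidable (Spec_split_simple_search phrase out) := by unfold Spec_split_simple_search; infer_instance

-- ===== CLAIM (what is proved, stated in full; the proofs are below) =====
def Claim_equal_split_simple_search : Prop := ∀ (phrase : String), Dom_split_simple_search phrase → Spec_split_simple_search phrase (split_simple_search phrase)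

-- ===== LEMMAS AND PROOFS =====

-- Python str.split() with a pending (non-flushed) token `buf`
def pvWsAux (buf : List Char) : List Char → List (List Char)
  | [] => if buf.isEmpty then [] else [buf]
  | c :: cs =>
    if PySem.Chars.isspace c then (if buf.isEmpty then [] else [buf]) ++ pvWsAux [] cs
    else pvWsAux (buf ++ [c]) cs

-- first '"'-separated segment of the input, and the remaining segments
def pvParts : List Char → List Char × List (List Char)
  | [] => ([], [])
  | c :: cs =>
    if c == '"' then ([], (pvParts cs).1 :: (pvParts cs).2)
    else (c :: (pvParts cs).1, (pvParts cs).2)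

-- A's loop, reformulated on the list of parts (q = current part is quoted)
def pvProc (q : Bool) : List (List Char) → List (List Char)
  | [] => []
  | p :: ps =>
    (if q then (if p.isEmpty then [] else ['"' :: (p ++ ['"'])]) else pvWsAux [] p) ++ pvProc (!q) ps

-- B's scanner as a structural recursion (buf pending, inq = inside quotes)
def pvRef (inq : Bool) (buf : List Char) : List Char → List (List Char)
  | [] => if buf.isEmpty then [] else [if inq then '"' :: (buf ++ ['"']) else buf]
  | c :: cs =>
    if c == '"' then
      (if buf.isEmpty then [] else [if inq then '"' :: (buf ++ ['"']) else buf]) ++ pvRef (!inq) [] cs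
    else if !inq && PySem.Chars.isspace c then
      (if buf.isEmpty then [] else [buf]) ++ pvRef inq [] cs
    else pvRef inq (buf ++ [c]) cs

theorem pvWsAux_ne_nil : ∀ (l buf t : List Char), t ∈ pvWsAux buf l → ¬ t.isEmpty := by
  intro l
  induction l with
  | nil =>
    intro buf t ht; simp [pvWsAux] at ht
    rcases ht with ⟨h1, h2⟩; simp [h2, h1]
  | cons c cs ih =>
    intro buf t ht
    simp only [pvWsAux] at ht
    split_ifs at ht with h1 h2
    · exact ih [] t ht
    · rcases List.mem_append.1 ht with h | h
      · simp at h; subst h; simpa using h2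
      · exact ih [] t h
    · exact ih (buf ++ [c]) t ht

theorem pvSplit0_go (l : List Char) : ∀ cur acc,
    PySem.Chars.split₀.go l cur acc = acc.reverse ++ pvWsAux cur.reverse l := by
  induction l with
  | nil => intro cur acc; simp [PySem.Chars.split₀.go, pvWsAux]; split_ifs <;> simp_all
  | cons c cs ih =>
    intro cur acc
    simp only [PySem.Chars.split₀.go, pvWsAux, List.isEmpty_reverse]
    split_ifs with h1 h2
    · simp [ih]
    · simp [ih]
    · rw [ih]; simp

theorem pvSplit0_eq (l : List Char) : PySem.Chars.split₀ l = pvWsAux [] l := by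
  simp [PySem.Chars.split₀, pvSplit0_go]

theorem pvSplitOn_go (l : List Char) : ∀ fuel cur acc, l.length < fuel →
    PySem.Chars.splitOn.go ['"'] fuel l cur acc
      = acc.reverse ++ ((cur.reverse ++ (pvParts l).1) :: (pvParts l).2) := by
  induction l with
  | nil =>
    intro fuel cur acc h
    match fuel, h with
    | fuel + 1, _ => simp [PySem.Chars.splitOn.go, pvParts]
  | cons c cs ih =>
    intro fuel cur acc h
    match fuel, h with
    | fuel + 1, h =>
      have hf : cs.length < fuel := by simpa using h
      by_cases hc : c = '"'
      · subst hc
        simp only [PySem.Chars.splitOn.go, pvParts, List.isPrefixOf, Bool.and_true,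
          BEq.rfl, if_true, List.length_singleton, List.drop_one, List.tail_cons]
        rw [ih fuel [] (cur.reverse :: acc) hf]
        simp
      · have hc' : (c == '"') = false := by simpa using hc
        have hc'' : ('"' == c) = false := by simpa using (Ne.symm hc)
        simp only [PySem.Chars.splitOn.go, pvParts, List.isPrefixOf, Bool.and_true,
          hc', hc'', Bool.false_eq_true, if_false]
        rw [ih fuel (c :: cur) acc hf]
        simp

theorem pvSplitOn_eq (l : List Char) :
    PySem.Chars.splitOn l ['"'] = (pvParts l).1 :: (pvParts l).2 := by
  rw [PySem.Chars.splitOn, pvSplitOn_go l (l.length + 1) [] [] (by omega)]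
  simp

theorem pvFold (ts : List (List Char)) : ∀ (pre acc : List (List Char)),
    (PySem.List.pyRange (pre.length : Int) ((pre.length + ts.length : Nat) : Int) 1).foldl
        (pvAStep (pre ++ ts)) acc
      = acc ++ pvProc (decide (pre.length % 2 = 1)) ts := by
  induction ts with
  | nil => intro pre acc; simp [pysem, pvProc]
  | cons t ts ih =>
    intro pre acc
    have hlt : (pre.length : Int) < ((pre.length + (t :: ts).length : Nat) : Int) := by
      push_cast; simp
    rw [PySem.List.pyRange_one_cons hlt, List.foldl_cons]
    have hget : PySem.List.pyGetD (pre ++ t :: ts) (pre.length : Int) [] = t := by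
      rw [PySem.List.pyGetD_natCast]
      simp [List.getD_eq_getElem?_getD]
    have hstep : pvAStep (pre ++ t :: ts) acc (pre.length : Int)
        = acc ++ (if decide (pre.length % 2 = 1) then
            (if t.isEmpty then [] else ['"' :: (t ++ ['"'])]) else pvWsAux [] t) := by
      by_cases hp : pre.length % 2 = 1
      · have hcond : (PySem.Int.mod (pre.length : Int) 2 == 0) = false := by
          rw [PySem.Int.mod_eq_emod_of_pos (b := 2) (by norm_num)]; simp; omega
        simp only [pvAStep, hcond, Bool.false_eq_true, if_false, hget, hp, decide_true, if_true]
        by_cases ht : t.isEmpty <;> simp [ht]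
      · have hcond : (PySem.Int.mod (pre.length : Int) 2 == 0) = true := by
          rw [PySem.Int.mod_eq_emod_of_pos (b := 2) (by norm_num)]; simp; omega
        simp only [pvAStep, hcond, if_true, hget, decide_eq_false hp, Bool.false_eq_true, if_false,
          pvSplit0_eq]
        rw [List.filter_eq_self.2 (by intro a ha; simpa using pvWsAux_ne_nil t [] a ha)]
    rw [hstep]
    have harr : pre ++ t :: ts = (pre ++ [t]) ++ ts := by simp
    have hcast : ((pre.length : Int) + 1) = (((pre ++ [t]).length : Nat) : Int) := by
      simp
    have hlen : ((pre.length + (t :: ts).length : Nat) : Int) = (((pre ++ [t]).length + ts.length : Nat) : Int) := by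
      push_cast; simp; ring
    have hq : (decide ((pre ++ [t]).length % 2 = 1)) = !decide (pre.length % 2 = 1) := by
      by_cases hp : pre.length % 2 = 1 <;> simp [List.length_append, hp] <;> omega
    rw [harr, hcast, hlen, ih (pre ++ [t]), hq]
    simp [pvProc]

theorem pvScan (cs : List Char) : ∀ (inq : Bool) (buf : List Char) (acc : List (List Char)),
    (if (cs.foldl pvScanStep (inq, buf, acc)).2.1.isEmpty then
       (cs.foldl pvScanStep (inq, buf, acc)).2.2
     else (cs.foldl pvScanStep (inq, buf, acc)).2.2 ++
       [if (cs.foldl pvScanStep (inq, buf, acc)).1 then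
          '"' :: ((cs.foldl pvScanStep (inq, buf, acc)).2.1 ++ ['"'])
        else (cs.foldl pvScanStep (inq, buf, acc)).2.1])
      = acc ++ pvRef inq buf cs := by
  induction cs with
  | nil =>
    intro inq buf acc
    simp only [List.foldl_nil, pvRef]
    by_cases hb : buf.isEmpty <;> simp [hb]
  | cons c cs ih =>
    intro inq buf acc
    simp only [List.foldl_cons, pvRef, pvScanStep]
    by_cases hc : c == '"'
    · simp only [hc, if_true]
      rw [ih]
      by_cases hb : buf.isEmpty <;> simp [hb]
    · simp only [hc, Bool.false_eq_true, if_false]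
      by_cases hw : (!inq && PySem.Chars.isspace c)
      · simp only [hw, if_true]
        rw [ih]
        by_cases hb : buf.isEmpty <;> simp [hb]
      · simp only [hw, Bool.false_eq_true, if_false]
        rw [ih]

theorem pvMain (cs : List Char) : ∀ (buf : List Char),
    (pvRef false buf cs = pvWsAux buf (pvParts cs).1 ++ pvProc true (pvParts cs).2)
    ∧ (pvRef true buf cs
        = (if (buf ++ (pvParts cs).1).isEmpty then [] else ['"' :: ((buf ++ (pvParts cs).1) ++ ['"'])])
          ++ pvProc false (pvParts cs).2) := by
  induction cs with
  | nil =>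
    intro buf
    constructor
    · simp [pvRef, pvWsAux, pvParts, pvProc]
    · simp [pvRef, pvParts, pvProc]
  | cons c cs ih =>
    intro buf
    by_cases hc : c == '"'
    · constructor
      · simp only [pvRef, hc, if_true, pvParts, Bool.not_false]
        rw [(ih []).2]
        by_cases hb : buf.isEmpty <;> by_cases hh : (pvParts cs).1.isEmpty <;>
          simp [pvWsAux, pvProc, hb, hh]
      · simp only [pvRef, hc, if_true, pvParts, Bool.not_true]
        rw [(ih []).1]
        by_cases hb : buf.isEmpty <;> simp [pvProc, hb]
    · by_cases hw : PySem.Chars.isspace c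
      · constructor
        · simp only [pvRef, hc, Bool.false_eq_true, if_false, Bool.not_false, hw, Bool.and_true,
            if_true, pvParts]
          rw [(ih []).1]
          by_cases hb : buf.isEmpty <;> simp [pvWsAux, hb, hw]
        · simp only [pvRef, hc, Bool.false_eq_true, if_false, Bool.not_true, Bool.false_and,
            pvParts]
          rw [(ih (buf ++ [c])).2]
          simp
      · constructor
        · simp only [pvRef, hc, Bool.false_eq_true, if_false, Bool.not_false, hw, Bool.and_false,
            pvParts]
          rw [(ih (buf ++ [c])).1]
          simp [pvWsAux, hw]
        · simp only [pvRef, hc, Bool.false_eq_true, if_false, Bool.not_true, Bool.false_and,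
            pvParts]
          rw [(ih (buf ++ [c])).2]
          simp

-- ===== VERDICT (by name: the statement is the Claim_ definition above) =====
theorem split_simple_search_spec : Claim_equal_split_simple_search := by
  intro phrase _
  unfold Spec_split_simple_search split_simple_search split_simple_search_alt
  simp only [pvSplitOn_eq, pvScan phrase.toList false [] []]
  have hfold := pvFold ((pvParts phrase.toList).1 :: (pvParts phrase.toList).2)
    ([] : List (List Char)) ([] : List (List Char))
  simp only [List.length_nil, List.nil_append, Nat.cast_zero, zero_add] at hfold
  rw [hfold]
  rw [(pvMain phrase.toList []).1]
  simp [pvProc]
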